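-- pv_equiv track=rewrite | github.com/damonlynch/rapid-photo-downloader | raphodo/thumbnailpara.py | split_indexes
-- ===== SOURCE A (Python) =====
-- from collections import deque
--
-- def split_list(alist: list, wanted_parts=2):
--     """
--     Split list into smaller parts
--     http://stackoverflow.com/questions/752308/split-list-into-smaller-lists
--     :param alist: the list
--     :param wanted_parts: how many lists it should be split into
--     :return: the split lists
--     """
--     length = len(alist)
--     return [
--         alist[i * length // wanted_parts : (i + 1) * length // wanted_parts]
--         for i in range(wanted_parts)
--     ]
--
-- def split_indexes(length: int):
--     """
--     For the length of a list, return a list of indexes into it such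
--     that the indexes start with the middle item, then the middle item
--     of the remaining two parts of the list, and so forth.
--
--     Perhaps this algorithm could be optimized, as I did it myself. But
--     hey it works and for now that's the main thing.
--
--     :param length: the length of the list i.e. the number of indexes
--      to be created
--     :return: the list of indexes
--     """
--     l = list(range(length))
--     n = []
--     master = deque([l])
--     while master:
--         l1, l2 = split_list(master.popleft())
--         if l2:
--             n.append(l2[0])
--             l2 = l2[1:]
--         if l1:
--             master.append(l1)
--         if l2:
--             master.append(l2)
--     return n
-- ===== SOURCE B (Python) =====
-- def split_indexes(length: int):
--     buckets = []
--     for i in range(length):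
--         s, e, d = 0, length, 0
--         while True:
--             m = (s + e) // 2
--             if i == m:
--                 break
--             if i < m:
--                 e = m
--             else:
--                 s = m + 1
--             d += 1
--         while len(buckets) <= d:
--             buckets.append([])
--         buckets[d].append(i)
--     return [i for b in buckets for i in b]
-- ===== Notes on version B (the rewrite author's own statement) =====
-- stated objective: alternative
-- what changed: Replace A's BFS with a deque of repeatedly sliced sublists by an independent per-index computation: for each index, descend the implicit binary-split tree arithmetically to find its depth, bucket the indexes by depth, and concatenate the buckets.
import Mathlib
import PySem

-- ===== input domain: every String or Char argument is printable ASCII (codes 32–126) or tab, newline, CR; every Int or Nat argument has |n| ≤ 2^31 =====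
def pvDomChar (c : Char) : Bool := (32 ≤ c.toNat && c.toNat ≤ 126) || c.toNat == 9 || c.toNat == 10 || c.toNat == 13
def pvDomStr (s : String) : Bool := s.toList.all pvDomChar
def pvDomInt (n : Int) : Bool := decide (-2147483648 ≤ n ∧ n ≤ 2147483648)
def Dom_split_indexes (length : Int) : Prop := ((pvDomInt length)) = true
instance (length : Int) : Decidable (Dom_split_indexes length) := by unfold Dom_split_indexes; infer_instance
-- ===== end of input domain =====

-- B replaces A's deque-of-sliced-sublists BFS by an independent per-index computation:
-- for each index, descend the implicit binary-split tree to find its depth, bucket the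
-- indexes by depth, and concatenate the buckets (objective: alternative algorithm, same cost).

-- ===== PORT A =====
-- helper split_list(alist, wanted_parts): list of slices over range(wanted_parts)
def pySplitList (alist : List Int) (wanted_parts : Int) : List (List Int) :=
  let length : Int := (alist.length : Int)
  (PySem.List.pyRange 0 wanted_parts 1).map (fun i =>
    PySem.List.slice alist
      (some (PySem.Int.floordiv (i * length) wanted_parts))
      (some (PySem.Int.floordiv ((i + 1) * length) wanted_parts)))

-- the while-loop over the deque `master`; fuel is only a totality guard
-- (2*length.toNat + 2 steps always suffice: each pop of a k-element list re-adds k-1 elements)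
def splitIndexesLoop : Nat → List (List Int) → List Int → List Int
  | 0, _, n => n
  | _ + 1, [], n => n
  | fuel + 1, cur :: rest, n =>
      let parts := pySplitList cur 2
      let l1 := parts.getD 0 []
      let l2 := parts.getD 1 []
      let n' := if l2.isEmpty then n else n ++ [l2.headD 0]
      let l2' := if l2.isEmpty then l2 else PySem.List.slice l2 (some 1) none
      let m1 := if l1.isEmpty then rest else rest ++ [l1]
      let m2 := if l2'.isEmpty then m1 else m1 ++ [l2']
      splitIndexesLoop fuel m2 n'

def split_indexes (length : Int) : List Int :=
  splitIndexesLoop (2 * length.toNat + 2) [PySem.List.pyRange 0 length 1] []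

-- ===== PORT B =====
-- the inner `while True` descent: depth of index i in the binary-split tree of [s, e);
-- the `s < e` guard only makes the recursion total (every real call keeps i inside [s, e))
def descLoop (i s e : Int) (d : Nat) : Nat :=
  if h : s < e then
    if i = PySem.Int.floordiv (s + e) 2 then d
    else if i < PySem.Int.floordiv (s + e) 2 then
      descLoop i s (PySem.Int.floordiv (s + e) 2) (d + 1)
    else
      descLoop i (PySem.Int.floordiv (s + e) 2 + 1) e (d + 1)
  else d
termination_by (e - s).toNat
decreasing_by
  · rw [PySem.Int.floordiv_eq_ediv_of_pos (by norm_num)] at *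
    omega
  · rw [PySem.Int.floordiv_eq_ediv_of_pos (by norm_num)] at *
    omega

-- one iteration of the `for i in range(length)` loop: pad `buckets` to length d+1, append i
def bstep (length : Int) (buckets : List (List Int)) (i : Int) : List (List Int) :=
  let d := descLoop i 0 length 0
  let padded := buckets ++ List.replicate (d + 1 - buckets.length) []
  padded.set d (padded.getD d [] ++ [i])

def split_indexes_alt (length : Int) : List Int :=
  (((PySem.List.pyRange 0 length 1).foldl (fun buckets i => bstep length buckets i) []).flatMap id)

-- ===== PRECONDITION & SPEC =====
def Spec_split_indexes (length : Int) (out : List Int) : Prop := out = split_indexes_alt length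
instance (length : Int) (out : List Int) : Decidable (Spec_split_indexes length out) := by unfold Spec_split_indexes; infer_instance

-- ===== CLAIM (what is proved, stated in full; the proofs are below) =====
def Claim_equal_split_indexes : Prop := ∀ (length : Int), Dom_split_indexes length → Spec_split_indexes length (split_indexes length)

-- ===== LEMMAS AND PROOFS =====

-- proof-side model: BFS queue of (start, end) half-open segments
def queueLoop : Nat → List (Int × Int) → List Int → List Int
  | 0, _, n => n
  | _ + 1, [], n => n
  | fuel + 1, (s, e) :: rest, n =>
      let mid := PySem.Int.floordiv (s + e) 2
      let n' := n ++ [mid]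
      let q1 := if s < mid then rest ++ [(s, mid)] else rest
      let q2 := if mid + 1 < e then q1 ++ [(mid + 1, e)] else q1
      queueLoop fuel q2 n'

def midP (p : Int × Int) : Int := PySem.Int.floordiv (p.1 + p.2) 2

def childrenP (p : Int × Int) : List (Int × Int) :=
  (if p.1 < midP p then [(p.1, midP p)] else []) ++
  (if midP p + 1 < p.2 then [(midP p + 1, p.2)] else [])

def midsAt : Nat → (Int × Int) → List Int
  | 0, p => [midP p]
  | d + 1, p => (childrenP p).flatMap (midsAt d)

def lvlsOut : Nat → List (Int × Int) → List Int
  | 0, _ => []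
  | k + 1, segs => segs.map midP ++ lvlsOut k (segs.flatMap childrenP)

def totSize (segs : List (Int × Int)) : Nat := (segs.map (fun p => (p.2 - p.1).toNat)).sum

def filt (n k : Int) (j : Nat) : List Int :=
  (PySem.List.pyRange 0 k 1).filter (fun i => decide (descLoop i 0 n 0 = j))

theorem pyRange_eq_nil_iff (a b : Int) : PySem.List.pyRange a b 1 = [] ↔ b ≤ a := by
  constructor
  · intro h
    by_contra hab
    rw [PySem.List.pyRange_one_cons (by omega)] at h
    exact List.cons_ne_nil _ _ h
  · exact PySem.List.pyRange_one_eq_nil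

-- A's split of a contiguous segment is the two half segments around the midpoint
theorem pySplitList_seg (s e : Int) (h : s < e) :
    pySplitList (PySem.List.pyRange s e 1) 2 =
      [PySem.List.pyRange s (PySem.Int.floordiv (s + e) 2) 1,
       PySem.List.pyRange (PySem.Int.floordiv (s + e) 2) e 1] := by
  have h2 : (0:Int) < 2 := by norm_num
  have hlen : ((PySem.List.pyRange s e 1).length : Int) = e - s := by
    rw [PySem.List.length_pyRange_one]; omega
  have hmid : PySem.Int.floordiv (s + e) 2 = s + (e - s) / 2 := by
    rw [PySem.Int.floordiv_eq_ediv_of_pos h2]; omega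
  set m : Int := PySem.Int.floordiv (s + e) 2 with hm
  have hsm : s ≤ m := by rw [hmid]; omega
  have hme : m ≤ e := by rw [hmid]; omega
  have hsplit := PySem.List.pyRange_one_append s m e hsm hme
  have hlena : (PySem.List.pyRange s m 1).length = (m - s).toNat :=
    PySem.List.length_pyRange_one s m
  have hlenb : (PySem.List.pyRange m e 1).length = (e - m).toNat :=
    PySem.List.length_pyRange_one m e
  have hd0 : PySem.Int.floordiv (0 * (e - s)) 2 = 0 := by
    rw [PySem.Int.floordiv_eq_ediv_of_pos h2]; norm_num
  have hd1 : PySem.Int.floordiv ((0 + 1) * (e - s)) 2 = m - s := by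
    rw [PySem.Int.floordiv_eq_ediv_of_pos h2, hmid]; omega
  have hd1' : PySem.Int.floordiv (1 * (e - s)) 2 = m - s := by
    rw [PySem.Int.floordiv_eq_ediv_of_pos h2, hmid]; omega
  have hd2 : PySem.Int.floordiv ((1 + 1) * (e - s)) 2 = e - s := by
    rw [PySem.Int.floordiv_eq_ediv_of_pos h2]; omega
  have hsl1 : PySem.List.slice (PySem.List.pyRange s e 1) (some 0) (some (m - s))
      = PySem.List.pyRange s m 1 := by
    rw [PySem.List.slice_toNat _ le_rfl (by omega), hsplit]
    simp only [Int.toNat_zero, List.drop_zero, Nat.sub_zero]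
    rw [← hlena, List.take_left]
  have hsl2 : PySem.List.slice (PySem.List.pyRange s e 1) (some (m - s)) (some (e - s))
      = PySem.List.pyRange m e 1 := by
    rw [PySem.List.slice_toNat _ (by omega) (by omega), hsplit]
    rw [← hlena, List.drop_left]
    apply List.take_of_length_le
    rw [hlenb]; omega
  have hr2 : PySem.List.pyRange 0 2 1 = [0, 1] := by decide
  unfold pySplitList
  rw [hr2]
  simp only [List.map_cons, List.map_nil, hlen, hd0, hd1, hd1', hd2, hsl1, hsl2]

-- A's deque-of-sublists loop agrees step for step with the segment-queue model
theorem loop_eq (fuel : Nat) : ∀ (qs : List (Int × Int)) (acc : List Int),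
    (∀ p ∈ qs, p.1 < p.2) →
    splitIndexesLoop fuel (qs.map (fun p => PySem.List.pyRange p.1 p.2 1)) acc
      = queueLoop fuel qs acc := by
  induction fuel with
  | zero => intro qs acc _; rfl
  | succ fuel ih =>
    intro qs acc hq
    match qs with
    | [] => rfl
    | (s, e) :: rest =>
      have hse : s < e := hq (s, e) (List.mem_cons_self ..)
      have h2 : (0:Int) < 2 := by norm_num
      have hmid : PySem.Int.floordiv (s + e) 2 = s + (e - s) / 2 := by
        rw [PySem.Int.floordiv_eq_ediv_of_pos h2]; omega
      set m : Int := PySem.Int.floordiv (s + e) 2 with hm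
      have hme : m < e := by rw [hmid]; omega
      have hsm : s ≤ m := by rw [hmid]; omega
      rw [List.map_cons]
      rw [splitIndexesLoop, queueLoop]
      simp only [pySplitList_seg s e hse, List.getD, List.getElem?_cons_zero,
        List.getElem?_cons_succ, Option.getD_some, ← hm]
      have hl2ne : PySem.List.pyRange m e 1 = m :: PySem.List.pyRange (m + 1) e 1 :=
        PySem.List.pyRange_one_cons hme
      have hl2notEmpty : (PySem.List.pyRange m e 1).isEmpty = false := by
        rw [hl2ne]; rfl
      rw [hl2notEmpty]
      simp only [Bool.false_eq_true, if_false]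
      rw [hl2ne]
      simp only [List.headD_cons, PySem.List.slice_from_one, List.tail_cons]
      have hinv : ∀ p ∈ (if s < m then rest ++ [(s, m)] else rest) ++
          (if m + 1 < e then [(m + 1, e)] else []), p.1 < p.2 := by
        intro p hp
        rcases List.mem_append.mp hp with h' | h'
        · by_cases h1 : s < m
          · rw [if_pos h1] at h'
            rcases List.mem_append.mp h' with h'' | h''
            · exact hq p (List.mem_cons_of_mem _ h'')
            · simp at h''; subst h''; exact h1
          · rw [if_neg h1] at h'; exact hq p (List.mem_cons_of_mem _ h')
        · by_cases h3 : m + 1 < e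
          · rw [if_pos h3] at h'; simp at h'; subst h'; exact h3
          · rw [if_neg h3] at h'; simp at h'
      have eA : ((PySem.List.pyRange s m 1).isEmpty) = !decide (s < m) := by
        by_cases hx : s < m
        · have : PySem.List.pyRange s m 1 = s :: PySem.List.pyRange (s+1) m 1 :=
            PySem.List.pyRange_one_cons hx
          simp [this, hx]
        · have : PySem.List.pyRange s m 1 = [] := (pyRange_eq_nil_iff s m).mpr (by omega)
          simp [this, hx]
      have eB : ((PySem.List.pyRange (m + 1) e 1).isEmpty) = !decide (m + 1 < e) := by
        by_cases hx : m + 1 < e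
        · have : PySem.List.pyRange (m+1) e 1 = (m+1) :: PySem.List.pyRange (m+1+1) e 1 :=
            PySem.List.pyRange_one_cons hx
          simp [this, hx]
        · have : PySem.List.pyRange (m+1) e 1 = [] := (pyRange_eq_nil_iff (m+1) e).mpr (by omega)
          simp [this, hx]
      rw [eA, eB]
      by_cases h1 : s < m <;> by_cases h3 : m + 1 < e <;> simp only [h1, h3,
          decide_true, decide_false, Bool.not_true, Bool.not_false, Bool.false_eq_true,
          if_false, if_true]
      · rw [show (rest.map (fun p => PySem.List.pyRange p.1 p.2 1)) ++ [PySem.List.pyRange s m 1] ++ [PySem.List.pyRange (m+1) e 1]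
              = ((rest ++ [(s, m)]) ++ [(m+1, e)]).map (fun p => PySem.List.pyRange p.1 p.2 1) by simp]
        exact ih _ _ (by simpa [h1, h3] using hinv)
      · rw [show (rest.map (fun p => PySem.List.pyRange p.1 p.2 1)) ++ [PySem.List.pyRange s m 1]
              = (rest ++ [(s, m)]).map (fun p => PySem.List.pyRange p.1 p.2 1) by simp]
        exact ih _ _ (by simpa [h1, h3] using hinv)
      · rw [show (rest.map (fun p => PySem.List.pyRange p.1 p.2 1)) ++ [PySem.List.pyRange (m+1) e 1]
              = (rest ++ [(m+1, e)]).map (fun p => PySem.List.pyRange p.1 p.2 1) by simp]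
        exact ih _ _ (by simpa [h1, h3] using hinv)
      · exact ih _ _ (by simpa [h1, h3] using hinv)

-- one queue step pushes exactly the children of the popped segment
theorem queue_step (fuel : Nat) (s e : Int) (rest : List (Int × Int)) (acc : List Int) :
    queueLoop (fuel + 1) ((s, e) :: rest) acc
      = queueLoop fuel (rest ++ childrenP (s, e)) (acc ++ [midP (s, e)]) := by
  rw [queueLoop]
  unfold childrenP midP
  set m : Int := PySem.Int.floordiv (s + e) 2 with hm
  by_cases h1 : s < m <;> by_cases h3 : m + 1 < e <;>
    simp only [h1, h3, if_true, if_false, List.append_assoc, List.append_nil,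
      List.nil_append, List.cons_append]

-- processing a whole block of the queue emits its midpoints and queues its children
theorem queue_chunk : ∀ (as : List (Int × Int)) (fuel : Nat) (bs : List (Int × Int)) (acc : List Int),
    queueLoop (fuel + as.length) (as ++ bs) acc
      = queueLoop fuel (bs ++ as.flatMap childrenP) (acc ++ as.map midP) := by
  intro as
  induction as with
  | nil => intro fuel bs acc; simp
  | cons p as ih =>
    intro fuel bs acc
    obtain ⟨s, e⟩ := p
    have : fuel + ((s, e) :: as).length = (fuel + as.length) + 1 := by simp; omega
    rw [this, List.cons_append, queue_step, List.append_assoc,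
      ih (fuel) (bs ++ childrenP (s, e)) (acc ++ [midP (s, e)])]
    simp [List.append_assoc, List.flatMap_cons]

-- children are nonempty segments of strictly smaller size; sizes sum to size - 1
theorem childrenP_inv (s e : Int) (h : s < e) :
    (∀ q ∈ childrenP (s, e), q.1 < q.2 ∧ (q.2 - q.1).toNat < (e - s).toNat) ∧
    totSize (childrenP (s, e)) + 1 = (e - s).toNat := by
  have hmid : midP (s, e) = s + (e - s) / 2 := by
    unfold midP
    rw [PySem.Int.floordiv_eq_ediv_of_pos (by norm_num)]
    simp; omega
  set m : Int := midP (s, e) with hm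
  constructor
  · intro q hq
    unfold childrenP at hq
    rw [← hm] at hq
    rcases List.mem_append.mp hq with h' | h'
    · by_cases h1 : s < m
      · rw [if_pos h1, List.mem_singleton] at h'
        subst h'
        constructor <;> simp <;> omega
      · rw [if_neg h1] at h'; simp at h'
    · by_cases h3 : m + 1 < e
      · rw [if_pos h3, List.mem_singleton] at h'
        subst h'
        constructor <;> simp <;> omega
      · rw [if_neg h3] at h'; simp at h'
  · unfold totSize childrenP
    rw [← hm]
    by_cases h1 : s < m <;> by_cases h3 : m + 1 < e <;>
      simp [h1, h3] <;> omega

theorem length_le_totSize : ∀ (segs : List (Int × Int)),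
    (∀ p ∈ segs, p.1 < p.2) → segs.length ≤ totSize segs := by
  intro segs
  induction segs with
  | nil => intro _; simp [totSize]
  | cons p segs ih =>
    intro h
    have hp := h p (List.mem_cons_self ..)
    have := ih (fun q hq => h q (List.mem_cons_of_mem _ hq))
    unfold totSize at *
    simp only [List.length_cons, List.map_cons, List.sum_cons]
    omega

theorem totSize_flatMap_children : ∀ (segs : List (Int × Int)),
    (∀ p ∈ segs, p.1 < p.2) →
    totSize (segs.flatMap childrenP) + segs.length = totSize segs := by
  intro segs
  induction segs with
  | nil => intro _; rfl
  | cons p segs ih =>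
    obtain ⟨a, b⟩ := p
    intro h
    have hp : a < b := h (a, b) (List.mem_cons_self ..)
    have h2 := (childrenP_inv a b hp).2
    have ih' := ih (fun q hq => h q (List.mem_cons_of_mem _ hq))
    unfold totSize at *
    simp only [List.flatMap_cons, List.map_append, List.sum_append, List.map_cons,
      List.sum_cons, List.length_cons]
    omega

-- with enough fuel, the queue loop produces the level-by-level output
theorem queue_lvls : ∀ (k : Nat) (segs : List (Int × Int)) (fuel : Nat) (acc : List Int),
    (∀ p ∈ segs, p.1 < p.2 ∧ (p.2 - p.1).toNat ≤ k) →
    totSize segs ≤ fuel →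
    queueLoop fuel segs acc = acc ++ lvlsOut k segs := by
  intro k
  induction k with
  | zero =>
    intro segs fuel acc hinv _
    have : segs = [] := by
      cases segs with
      | nil => rfl
      | cons p segs =>
        have := hinv p (List.mem_cons_self ..)
        omega
    subst this
    cases fuel <;> simp [queueLoop, lvlsOut]
  | succ k ih =>
    intro segs fuel acc hinv hfuel
    have hne : ∀ p ∈ segs, p.1 < p.2 := fun p hp => (hinv p hp).1
    have hlen : segs.length ≤ totSize segs := length_le_totSize segs hne
    have hfe : fuel = (fuel - segs.length) + segs.length := by omega
    have hstep := queue_chunk segs (fuel - segs.length) [] acc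
    rw [← hfe] at hstep
    rw [show segs = segs ++ [] by simp] at hstep ⊢
    simp only [List.append_nil] at hstep ⊢
    rw [hstep, List.nil_append]
    have hsz := totSize_flatMap_children segs hne
    have hchild : ∀ q ∈ segs.flatMap childrenP, q.1 < q.2 ∧ (q.2 - q.1).toNat ≤ k := by
      intro q hq
      rw [List.mem_flatMap] at hq
      obtain ⟨p, hp, hq⟩ := hq
      have h1 := (childrenP_inv p.1 p.2 (hne p hp)).1 q hq
      have h2 := (hinv p hp).2
      omega
    rw [ih (segs.flatMap childrenP) (fuel - segs.length) (acc ++ segs.map midP) hchild (by omega)]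
    rw [lvlsOut]
    simp [List.append_assoc]

-- the level output is the concatenation over depths of the per-depth midpoints
theorem lvls_flatten : ∀ (k : Nat) (segs : List (Int × Int)),
    lvlsOut k segs = ((List.range k).map (fun d => segs.flatMap (midsAt d))).flatten := by
  intro k
  induction k with
  | zero => intro segs; simp [lvlsOut]
  | succ k ih =>
    intro segs
    rw [lvlsOut, ih, List.range_succ_eq_map]
    simp only [List.map_cons, List.flatten_cons, List.map_map]
    congr 1
    · simp only [midsAt]
      exact List.map_eq_flatMap
    · congr 1
      apply List.map_congr_left
      intro d _
      simp only [Function.comp_apply]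
      rw [List.flatMap_assoc]
      rfl

-- the descent depth is an accumulator
theorem desc_acc : ∀ (sz : Nat) (s e i : Int), (e - s).toNat = sz → ∀ d : Nat,
    descLoop i s e d = descLoop i s e 0 + d := by
  intro sz
  induction sz using Nat.strong_induction_on with
  | _ sz ih =>
    intro s e i hsz d
    conv_lhs => rw [descLoop]
    conv_rhs => rw [descLoop]
    by_cases h : s < e
    · simp only [dif_pos h]
      have hmid : PySem.Int.floordiv (s + e) 2 = s + (e - s) / 2 := by
        rw [PySem.Int.floordiv_eq_ediv_of_pos (by norm_num)]; omega
      set m : Int := PySem.Int.floordiv (s + e) 2 with hm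
      by_cases h1 : i = m
      · simp [h1]
      · simp only [if_neg h1]
        by_cases h2 : i < m
        · simp only [if_pos h2]
          rw [ih (m - s).toNat (by omega) s m i rfl (d + 1),
              ih (m - s).toNat (by omega) s m i rfl (0 + 1)]
          omega
        · simp only [if_neg h2]
          rw [ih (e - (m + 1)).toNat (by omega) (m + 1) e i rfl (d + 1),
              ih (e - (m + 1)).toNat (by omega) (m + 1) e i rfl (0 + 1)]
          omega
    · simp only [dif_neg h]; omega

-- per-depth midpoints of a segment = the indexes of that segment whose descent depth is d
theorem mids_filter : ∀ (sz : Nat) (s e : Int), (e - s).toNat = sz → s < e → ∀ d : Nat,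
    midsAt d (s, e) = (PySem.List.pyRange s e 1).filter (fun i => decide (descLoop i s e 0 = d)) := by
  intro sz
  induction sz using Nat.strong_induction_on with
  | _ sz ih =>
    intro s e hsz hse d
    have hmid : PySem.Int.floordiv (s + e) 2 = s + (e - s) / 2 := by
      rw [PySem.Int.floordiv_eq_ediv_of_pos (by norm_num)]; omega
    have hmP : midP (s, e) = PySem.Int.floordiv (s + e) 2 := rfl
    set m : Int := PySem.Int.floordiv (s + e) 2 with hm
    have hsm : s ≤ m := by omega
    have hme : m < e := by omega
    have hdesc_at : ∀ i : Int, s < e → i = m → descLoop i s e 0 = 0 := by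
      intro i h hi
      rw [descLoop, dif_pos h, ← hm, if_pos hi]
    have hdesc_lt : ∀ i : Int, i < m → descLoop i s e 0 = descLoop i s m 0 + 1 := by
      intro i hi
      rw [descLoop, dif_pos hse, ← hm, if_neg (by omega), if_pos hi]
      exact desc_acc (m - s).toNat s m i rfl 1
    have hdesc_gt : ∀ i : Int, m < i → descLoop i s e 0 = descLoop i (m + 1) e 0 + 1 := by
      intro i hi
      rw [descLoop, dif_pos hse, ← hm, if_neg (by omega), if_neg (by omega)]
      exact desc_acc (e - (m + 1)).toNat (m + 1) e i rfl 1
    have hsplit : PySem.List.pyRange s e 1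
        = PySem.List.pyRange s m 1 ++ m :: PySem.List.pyRange (m + 1) e 1 := by
      rw [PySem.List.pyRange_one_append s m e hsm (by omega),
          PySem.List.pyRange_one_cons hme]
    rw [hsplit, List.filter_append, List.filter_cons]
    cases d with
    | zero =>
      have hfl : (PySem.List.pyRange s m 1).filter (fun i => decide (descLoop i s e 0 = 0)) = [] := by
        apply List.filter_eq_nil_iff.mpr
        intro i hi
        rw [PySem.List.mem_pyRange_one] at hi
        simp [hdesc_lt i (by omega)]
      have hfr : (PySem.List.pyRange (m + 1) e 1).filter (fun i => decide (descLoop i s e 0 = 0)) = [] := by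
        apply List.filter_eq_nil_iff.mpr
        intro i hi
        rw [PySem.List.mem_pyRange_one] at hi
        simp [hdesc_gt i (by omega)]
      rw [hfl, hfr]
      simp [midsAt, hmP, hdesc_at m hse rfl]
    | succ d =>
      have hfm : ¬ (descLoop m s e 0 = d + 1) := by rw [hdesc_at m hse rfl]; omega
      have hfl : (PySem.List.pyRange s m 1).filter (fun i => decide (descLoop i s e 0 = d + 1))
          = (PySem.List.pyRange s m 1).filter (fun i => decide (descLoop i s m 0 = d)) := by
        apply List.filter_congr
        intro i hi
        rw [PySem.List.mem_pyRange_one] at hi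
        rw [hdesc_lt i (by omega)]
        simp only [decide_eq_decide]
        omega
      have hfr : (PySem.List.pyRange (m + 1) e 1).filter (fun i => decide (descLoop i s e 0 = d + 1))
          = (PySem.List.pyRange (m + 1) e 1).filter (fun i => decide (descLoop i (m + 1) e 0 = d)) := by
        apply List.filter_congr
        intro i hi
        rw [PySem.List.mem_pyRange_one] at hi
        rw [hdesc_gt i (by omega)]
        simp only [decide_eq_decide]
        omega
      rw [hfl, hfr]
      simp only [hfm, decide_false]
      have hL : (if s < m then midsAt d (s, m) else [])
          = (PySem.List.pyRange s m 1).filter (fun i => decide (descLoop i s m 0 = d)) := by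
        by_cases h1 : s < m
        · rw [if_pos h1, ih (m - s).toNat (by omega) s m rfl h1 d]
        · rw [if_neg h1, (pyRange_eq_nil_iff s m).mpr (by omega)]
          rfl
      have hR : (if m + 1 < e then midsAt d (m + 1, e) else [])
          = (PySem.List.pyRange (m + 1) e 1).filter (fun i => decide (descLoop i (m + 1) e 0 = d)) := by
        by_cases h3 : m + 1 < e
        · rw [if_pos h3, ih (e - (m + 1)).toNat (by omega) (m + 1) e rfl h3 d]
        · rw [if_neg h3, (pyRange_eq_nil_iff (m + 1) e).mpr (by omega)]
          rfl
      rw [midsAt]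
      unfold childrenP
      rw [hmP]
      by_cases h1 : s < m <;> by_cases h3 : m + 1 < e <;>
        simp only [h1, h3, if_true, if_false, List.flatMap_append, List.flatMap_cons,
          List.flatMap_nil, List.append_nil, List.nil_append] <;>
        rw [← hL, ← hR] <;> simp [h1, h3]

-- the descent depth of an index inside [s, e) is below the segment size
theorem desc_lt_size : ∀ (sz : Nat) (s e i : Int), (e - s).toNat = sz → s ≤ i → i < e →
    descLoop i s e 0 < (e - s).toNat := by
  intro sz
  induction sz using Nat.strong_induction_on with
  | _ sz ih =>
    intro s e i hsz hsi hie
    have hse : s < e := by omega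
    rw [descLoop, dif_pos hse]
    have hmid : PySem.Int.floordiv (s + e) 2 = s + (e - s) / 2 := by
      rw [PySem.Int.floordiv_eq_ediv_of_pos (by norm_num)]; omega
    set m : Int := PySem.Int.floordiv (s + e) 2 with hm
    by_cases h1 : i = m
    · rw [if_pos h1]; omega
    · rw [if_neg h1]
      by_cases h2 : i < m
      · rw [if_pos h2]
        rw [desc_acc (m - s).toNat s m i rfl 1]
        have := ih (m - s).toNat (by omega) s m i rfl hsi h2
        omega
      · rw [if_neg h2]
        rw [desc_acc (e - (m + 1)).toNat (m + 1) e i rfl 1]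
        have := ih (e - (m + 1)).toNat (by omega) (m + 1) e i rfl (by omega) hie
        omega

-- a list is recovered from its per-index getD
theorem list_eq_map_range_getD (l : List (List Int)) :
    (List.range l.length).map (fun j => l.getD j []) = l := by
  apply List.ext_getElem
  · simp
  · intro j h1 h2
    simp only [List.getElem_map, List.getElem_range]
    rw [List.getD_eq_getElem?_getD, List.getElem?_eq_getElem h2]
    rfl

theorem flatten_range_ext (f : Nat → List Int) (K : Nat) (hK : ∀ d, K ≤ d → f d = []) :
    ∀ t, ((List.range (K + t)).map f).flatten = ((List.range K).map f).flatten := by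
  intro t
  induction t with
  | zero => rfl
  | succ t ih =>
    rw [show K + (t + 1) = (K + t) + 1 by omega, List.range_succ]
    simp [hK (K + t) (by omega), ih]

-- the invariant of B's bucket-building fold
theorem fold_inv (n : Int) : ∀ (t : Nat),
    (∀ j : Nat, j < ((PySem.List.pyRange 0 (t : Int) 1).foldl (fun buckets i => bstep n buckets i) []).length →
      ((PySem.List.pyRange 0 (t : Int) 1).foldl (fun buckets i => bstep n buckets i) []).getD j [] = filt n (t : Int) j) ∧
    (∀ j : Nat, ((PySem.List.pyRange 0 (t : Int) 1).foldl (fun buckets i => bstep n buckets i) []).length ≤ j →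
      filt n (t : Int) j = []) := by
  intro t
  induction t with
  | zero =>
    constructor
    · intro j hj
      simp at hj
    · intro j _
      simp [filt]
  | succ t ih =>
    obtain ⟨ih1, ih2⟩ := ih
    set B : List (List Int) := (PySem.List.pyRange 0 (t : Int) 1).foldl (fun buckets i => bstep n buckets i) [] with hB
    have hcast : ((t + 1 : Nat) : Int) = (t : Int) + 1 := by push_cast; ring
    have hsucc : PySem.List.pyRange 0 ((t + 1 : Nat) : Int) 1
        = PySem.List.pyRange 0 (t : Int) 1 ++ [(t : Int)] := by
      rw [hcast, PySem.List.pyRange_one_succ_right (by positivity)]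
    have hfold : (PySem.List.pyRange 0 ((t + 1 : Nat) : Int) 1).foldl (fun buckets i => bstep n buckets i) []
        = bstep n B (t : Int) := by
      rw [hsucc, List.foldl_append]
      rfl
    set d : Nat := descLoop (t : Int) 0 n 0 with hd
    set padded : List (List Int) := B ++ List.replicate (d + 1 - B.length) [] with hpad
    have hBstep : bstep n B (t : Int) = padded.set d (padded.getD d [] ++ [(t : Int)]) := rfl
    have hplen : d < padded.length := by
      rw [hpad]
      simp [List.length_append, List.length_replicate]
      omega
    have hlen' : (padded.set d (padded.getD d [] ++ [(t : Int)])).length = padded.length := by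
      simp
    have hpget : ∀ j : Nat, padded.getD j [] = if j < B.length then B.getD j [] else [] := by
      intro j
      rw [hpad]
      by_cases hj : j < B.length
      · rw [if_pos hj, List.getD_eq_getElem?_getD, List.getElem?_append_left hj,
            ← List.getD_eq_getElem?_getD]
      · rw [if_neg hj, List.getD_eq_getElem?_getD, List.getElem?_append_right (by omega)]
        by_cases hj2 : j - B.length < d + 1 - B.length
        · rw [List.getElem?_eq_getElem (by simpa using hj2)]
          simp [List.getElem_replicate]
        · rw [List.getElem?_eq_none (by simpa using hj2)]
          rfl
    have hfilt : ∀ j : Nat, filt n ((t + 1 : Nat) : Int) j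
        = filt n (t : Int) j ++ (if decide (descLoop (t : Int) 0 n 0 = j) then [(t : Int)] else []) := by
      intro j
      unfold filt
      rw [hsucc, List.filter_append]
      congr 1
      simp [List.filter_cons]
    have hget : ∀ j : Nat, (padded.set d (padded.getD d [] ++ [(t : Int)])).getD j []
        = if j = d then padded.getD d [] ++ [(t : Int)] else padded.getD j [] := by
      intro j
      by_cases hj : j = d
      · subst hj
        rw [if_pos rfl, List.getD_eq_getElem?_getD, List.getElem?_set_self (by omega)]
        simp [hplen]
      · rw [if_neg hj, List.getD_eq_getElem?_getD, List.getElem?_set_ne (by omega),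
            ← List.getD_eq_getElem?_getD]
    have hbucketd : padded.getD d [] = filt n (t : Int) d := by
      rw [hpget d]
      by_cases hj : d < B.length
      · rw [if_pos hj]; exact ih1 d hj
      · rw [if_neg hj, ih2 d (by omega)]
    constructor
    · intro j hj
      rw [hfold, hBstep] at hj ⊢
      rw [hget j, hfilt j]
      by_cases hjd : j = d
      · subst hjd
        rw [if_pos rfl, hbucketd, ← hd]
        simp
      · have hne2 : ¬ (descLoop (t : Int) 0 n 0 = j) := by rw [← hd]; omega
        rw [if_neg hjd, if_neg (by simpa using hne2)]
        rw [List.append_nil, hpget j]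
        rw [hlen'] at hj
        by_cases hjB : j < B.length
        · rw [if_pos hjB]; exact ih1 j hjB
        · rw [if_neg hjB, ih2 j (by omega)]
    · intro j hj
      rw [hfold, hBstep, hlen'] at hj
      have hjlen : padded.length ≤ j := hj
      have hjB : B.length ≤ j := by
        rw [hpad] at hjlen; simp at hjlen; omega
      have hjd : d < j := by
        rw [hpad] at hjlen; simp at hjlen; omega
      rw [hfilt j, ih2 j hjB, ← hd, if_neg (by simp; omega)]
      rfl

-- ===== VERDICT (by name: the statement is the Claim_ definition above) =====
theorem split_indexes_spec : Claim_equal_split_indexes := by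
  intro n _
  unfold Spec_split_indexes
  by_cases hl : n ≤ 0
  · unfold split_indexes split_indexes_alt
    rw [PySem.List.pyRange_one_eq_nil hl]
    have h0 : n.toNat = 0 := Int.toNat_of_nonpos hl
    rw [h0]
    rfl
  · replace hl : 0 < n := by omega
    -- A side: queue loop, then levels, then per-depth filters
    have hA : split_indexes n = queueLoop (2 * n.toNat + 2) [(0, n)] [] := by
      unfold split_indexes
      rw [show [PySem.List.pyRange 0 n 1]
          = ([((0:Int), n)]).map (fun p => PySem.List.pyRange p.1 p.2 1) by simp]
      apply loop_eq
      intro p hp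
      simp at hp
      subst hp
      simpa using hl
    set k0 : Nat := n.toNat with hk0
    have htot : totSize [(0, n)] = n.toNat := by simp [totSize]
    have hAl : queueLoop (2 * n.toNat + 2) [(0, n)] [] = lvlsOut k0 [(0, n)] := by
      have := queue_lvls k0 [(0, n)] (2 * n.toNat + 2) []
        (by intro p hp; simp at hp; subst hp; constructor <;> simp <;> omega)
        (by rw [htot]; omega)
      simpa using this
    have hAf : lvlsOut k0 [(0, n)]
        = ((List.range k0).map (fun d => filt n n d)).flatten := by
      rw [lvls_flatten]
      congr 1
      apply List.map_congr_left
      intro d _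
      rw [show ([((0:Int), n)]).flatMap (midsAt d) = midsAt d (0, n) by simp]
      rw [mids_filter (n - 0).toNat 0 n rfl (by omega) d]
      unfold filt
      simp
    -- B side: the fold's buckets are the per-depth filters
    have hrange : PySem.List.pyRange 0 n 1 = PySem.List.pyRange 0 ((n.toNat : Nat) : Int) 1 := by
      rw [Int.toNat_of_nonneg (by omega)]
    obtain ⟨inv1, inv2⟩ := fold_inv n n.toNat
    set B : List (List Int) := (PySem.List.pyRange 0 ((n.toNat : Nat) : Int) 1).foldl
      (fun buckets i => bstep n buckets i) [] with hBdef
    have hB : split_indexes_alt n = B.flatten := by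
      unfold split_indexes_alt
      rw [hrange, ← hBdef, List.flatMap_id]
    have hcast2 : ((n.toNat : Nat) : Int) = n := Int.toNat_of_nonneg (by omega)
    have hBf : B = (List.range B.length).map (fun j => filt n n j) := by
      conv_lhs => rw [← list_eq_map_range_getD B]
      apply List.map_congr_left
      intro j hj
      rw [List.mem_range] at hj
      rw [inv1 j hj, hcast2]
    -- filters vanish beyond both k0 and B.length
    have hvanish0 : ∀ d : Nat, k0 ≤ d → filt n n d = [] := by
      intro d hd
      apply List.filter_eq_nil_iff.mpr
      intro i hi
      rw [PySem.List.mem_pyRange_one] at hi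
      have := desc_lt_size (n - 0).toNat 0 n i rfl (by omega) (by omega)
      simp only [decide_eq_true_eq]
      omega
    have hvanishL : ∀ d : Nat, B.length ≤ d → filt n n d = [] := by
      intro d hd
      have h := inv2 d hd
      rwa [hcast2] at h
    rw [hA, hAl, hAf, hB, hBf]
    rcases Nat.le_total k0 B.length with hle | hle
    · obtain ⟨t, ht⟩ := Nat.exists_eq_add_of_le hle
      rw [ht, flatten_range_ext _ k0 hvanish0 t]
    · obtain ⟨t, ht⟩ := Nat.exists_eq_add_of_le hle
      rw [ht, flatten_range_ext _ B.length hvanishL t]
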